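-- pv_equiv track=rewrite | github.com/Yipit/databricks-notebook-linter | src/databricks_notebook_linter/fix_magic.py | _split_into_cells
-- ===== SOURCE A (Python) =====
-- CELL_SEPARATOR = "# COMMAND ----------"
--
-- def _split_into_cells(lines: list[str]) -> list[tuple[int, list[str]]]:
--     """Split notebook lines into cells on ``# COMMAND ----------`` boundaries."""
--     cells: list[tuple[int, list[str]]] = []
--     current_start = 0
--     current: list[str] = []
--
--     for i, line in enumerate(lines):
--         if CELL_SEPARATOR in line:
--             if current:
--                 cells.append((current_start, current))
--                 current = []
--             cells.append((i, [line]))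
--             current_start = i + 1
--         else:
--             if not current:
--                 current_start = i
--             current.append(line)
--
--     if current:
--         cells.append((current_start, current))
--
--     return cells
-- ===== SOURCE B (Python) =====
-- CELL_SEPARATOR = "# COMMAND ----------"
--
-- def _split_into_cells(lines: list[str]) -> list[tuple[int, list[str]]]:
--     """Split notebook lines into cells on ``# COMMAND ----------`` boundaries."""
--     seps = [(i, l) for i, l in enumerate(lines) if CELL_SEPARATOR in l]
--     cells: list[tuple[int, list[str]]] = []
--     prev = 0
--     for i, l in seps:
--         chunk = lines[prev:i]
--         if chunk:
--             cells.append((prev, chunk))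
--         cells.append((i, [l]))
--         prev = i + 1
--     tail = lines[prev:]
--     if tail:
--         cells.append((prev, tail))
--     return cells
-- ===== Notes on version B (the rewrite author's own statement) =====
-- stated objective: alternative
-- what changed: Replaces A's single-pass accumulator loop (growing a 'current' cell line by line with start-tracking state) by a two-pass shape: first build the table of separator positions, then walk it slicing lines[prev:i] for the non-separator runs.
import Mathlib
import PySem

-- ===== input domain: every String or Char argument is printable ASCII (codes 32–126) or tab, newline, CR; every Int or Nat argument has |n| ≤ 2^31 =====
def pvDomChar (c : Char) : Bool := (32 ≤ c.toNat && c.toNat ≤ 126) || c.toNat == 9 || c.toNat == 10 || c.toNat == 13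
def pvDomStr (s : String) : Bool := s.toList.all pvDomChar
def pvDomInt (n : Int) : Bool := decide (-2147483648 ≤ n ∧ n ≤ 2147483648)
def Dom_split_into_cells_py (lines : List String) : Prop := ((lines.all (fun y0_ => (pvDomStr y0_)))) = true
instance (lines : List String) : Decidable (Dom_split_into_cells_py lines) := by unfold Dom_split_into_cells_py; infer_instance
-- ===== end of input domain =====

-- B replaces A's single-pass accumulator loop by a two-pass shape (separator-index table, then slicing); alternative decomposition, same cost.


def pvSep : String := "# COMMAND ----------"

-- ===== PORT A =====
-- the for-loop over enumerate(lines) with state (cells, current_start, current)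
def loopA : List (Int × String) → (List (Int × List String) × Int × List String) → (List (Int × List String) × Int × List String)
  | [], st => st
  | (i, line) :: rest, (cells, cs, cur) =>
    if PySem.Str.isIn pvSep line then
      loopA rest ((if cur ≠ [] then cells ++ [(cs, cur)] else cells) ++ [(i, [line])], i + 1, [])
    else
      loopA rest (cells, (if cur = [] then i else cs), cur ++ [line])

def split_into_cells_py (lines : List String) : List (Int × List String) :=
  let st := loopA (PySem.List.enumerate lines 0) ([], 0, [])
  if st.2.2 ≠ [] then st.1 ++ [(st.2.1, st.2.2)] else st.1

-- ===== PORT B =====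
-- the for-loop over the separator table seps, slicing lines[prev:i]
def loopB : List (Int × String) → Int → List String → List (Int × List String) → List (Int × List String)
  | [], prev, lines, cells =>
    let tail := PySem.List.slice lines (some prev) none
    if tail ≠ [] then cells ++ [(prev, tail)] else cells
  | (i, l) :: rest, prev, lines, cells =>
    let chunk := PySem.List.slice lines (some prev) (some i)
    loopB rest (i + 1) lines
      ((if chunk ≠ [] then cells ++ [(prev, chunk)] else cells) ++ [(i, [l])])

def split_into_cells_py_alt (lines : List String) : List (Int × List String) :=
  let seps := (PySem.List.enumerate lines 0).filter (fun p => PySem.Str.isIn pvSep p.2)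
  loopB seps 0 lines []

-- ===== PRECONDITION & SPEC =====
def Spec_split_into_cells_py (lines : List String) (out : List (Int × List String)) : Prop := out = split_into_cells_py_alt lines
instance (lines : List String) (out : List (Int × List String)) : Decidable (Spec_split_into_cells_py lines out) := by unfold Spec_split_into_cells_py; infer_instance

-- ===== CLAIM (what is proved, stated in full; the proofs are below) =====
def Claim_equal_split_into_cells_py : Prop := ∀ (lines : List String), Dom_split_into_cells_py lines → Spec_split_into_cells_py lines (split_into_cells_py lines)

-- ===== LEMMAS AND PROOFS =====

-- A's loop only appends to its cells accumulator
theorem loopA_cells (es : List (Int × String)) : ∀ (cells : List (Int × List String)) (cs : Int) (cur : List String),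
    loopA es (cells, cs, cur) = (cells ++ (loopA es ([], cs, cur)).1, (loopA es ([], cs, cur)).2) := by
  induction es with
  | nil => intro cells cs cur; simp [loopA]
  | cons e rest ih =>
    obtain ⟨i, line⟩ := e
    intro cells cs cur
    by_cases h : PySem.Str.isIn pvSep line
    · simp only [loopA, h, if_pos]
      rw [ih, ih ((if cur ≠ [] then [] ++ [(cs, cur)] else []) ++ [(i, [line])])]
      split_ifs <;> simp
    · simp only [loopA, h, if_neg, Bool.false_eq_true, not_false_iff]
      rw [ih, ih []]

-- shifting the enumeration start and the start-tracking state by k shifts every produced index by k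
theorem loopA_shift (xs : List String) : ∀ (i k cs : Int) (cur : List String),
    loopA (PySem.List.enumerate xs (i + k)) ([], cs + k, cur)
      = ((loopA (PySem.List.enumerate xs i) ([], cs, cur)).1.map (fun q => (q.1 + k, q.2)),
         (loopA (PySem.List.enumerate xs i) ([], cs, cur)).2.1 + k,
         (loopA (PySem.List.enumerate xs i) ([], cs, cur)).2.2) := by
  induction xs with
  | nil => intro i k cs cur; simp [PySem.List.enumerate_nil, loopA]
  | cons x xs ih =>
    intro i k cs cur
    rw [PySem.List.enumerate_cons, PySem.List.enumerate_cons]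
    by_cases h : PySem.Str.isIn pvSep x
    · simp only [loopA, h, if_pos]
      rw [loopA_cells, loopA_cells (es := PySem.List.enumerate xs (i + 1))]
      have hs : i + k + 1 = (i + 1) + k := by ring
      rw [hs, ih (i + 1) k (i + 1) []]
      split_ifs <;> simp
    · simp only [loopA, h, if_neg, Bool.false_eq_true, not_false_iff]
      have hs : i + k + 1 = (i + 1) + k := by ring
      have hcs : (if cur = [] then i + k else cs + k) = (if cur = [] then i else cs) + k := by
        split_ifs <;> rfl
      rw [hs, hcs, ih]

theorem loopA_append (e1 e2 : List (Int × String)) : ∀ st, loopA (e1 ++ e2) st = loopA e2 (loopA e1 st) := by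
  induction e1 with
  | nil => intro st; simp [loopA]
  | cons e rest ih =>
    obtain ⟨i, line⟩ := e
    intro st
    obtain ⟨cells, cs, cur⟩ := st
    by_cases h : PySem.Str.isIn pvSep line <;> simp only [List.cons_append, loopA, h] <;> simp [ih]

-- running A's loop over a separator-free block extends the current cell
theorem loopA_run (xs : List String) (h : ∀ l ∈ xs, PySem.Str.isIn pvSep l = false) :
    ∀ (i : Int) (cells : List (Int × List String)) (cs : Int) (cur : List String), cur ≠ [] →
      loopA (PySem.List.enumerate xs i) (cells, cs, cur) = (cells, cs, cur ++ xs) := by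
  induction xs with
  | nil => intro i cells cs cur _; simp [PySem.List.enumerate_nil, loopA]
  | cons x xs ih =>
    intro i cells cs cur hcur
    rw [PySem.List.enumerate_cons]
    have hx : PySem.Str.isIn pvSep x = false := h x (List.mem_cons_self)
    simp only [loopA, hx, Bool.false_eq_true, if_neg, not_false_iff, if_neg hcur]
    rw [ih (fun l hl => h l (List.mem_cons_of_mem _ hl)) _ _ _ _ (by simp)]
    simp

theorem loopA_pre (xs : List String) (h : ∀ l ∈ xs, PySem.Str.isIn pvSep l = false)
    (i : Int) (cells : List (Int × List String)) (cs : Int) :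
    loopA (PySem.List.enumerate xs i) (cells, cs, []) = (cells, if xs = [] then cs else i, xs) := by
  cases xs with
  | nil => simp [PySem.List.enumerate_nil, loopA]
  | cons x xs =>
    rw [PySem.List.enumerate_cons]
    have hx : PySem.Str.isIn pvSep x = false := h x (List.mem_cons_self)
    simp only [loopA, hx, Bool.false_eq_true, if_neg, not_false_iff]
    rw [loopA_run xs (fun l hl => h l (List.mem_cons_of_mem _ hl)) _ _ _ _ (by simp)]
    simp

-- B's loop only appends to its cells accumulator
theorem loopB_cells (seps : List (Int × String)) : ∀ (prev : Int) (lines : List String) (cells : List (Int × List String)),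
    loopB seps prev lines cells = cells ++ loopB seps prev lines [] := by
  induction seps with
  | nil => intro prev lines cells; simp only [loopB]; split_ifs <;> simp
  | cons e rest ih =>
    obtain ⟨i, l⟩ := e
    intro prev lines cells
    simp only [loopB]
    conv_lhs => rw [ih]
    conv_rhs => rw [ih]
    split_ifs <;> simp

-- enumeration with shifted start
theorem enumerate_shift (xs : List String) : ∀ (i k : Int),
    PySem.List.enumerate xs (i + k) = (PySem.List.enumerate xs i).map (fun q => (q.1 + k, q.2)) := by
  induction xs with
  | nil => intro i k; simp [PySem.List.enumerate_nil]
  | cons x xs ih =>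
    intro i k
    rw [PySem.List.enumerate_cons, PySem.List.enumerate_cons]
    have : i + k + 1 = (i + 1) + k := by ring
    rw [this, ih]
    simp

-- prepending a block of length k to lines while shifting the separator table and prev by k shifts B's output by k
theorem loopB_shift (seps : List (Int × String)) : ∀ (front rest : List String) (prev : Nat),
    (∀ q ∈ seps, 0 ≤ q.1) →
    loopB (seps.map (fun q => (q.1 + (front.length : Int), q.2))) ((prev : Int) + front.length) (front ++ rest) []
      = (loopB seps (prev : Int) rest []).map (fun q => (q.1 + (front.length : Int), q.2)) := by
  induction seps with
  | nil =>
    intro front rest prev _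
    simp only [List.map_nil, loopB]
    have h1 : ((prev : Int) + front.length) = ((prev + front.length : Nat) : Int) := by push_cast; ring
    rw [h1, PySem.List.slice_from_natCast, PySem.List.slice_from_natCast]
    have h2 : (front ++ rest).drop (prev + front.length) = rest.drop prev := by
      rw [Nat.add_comm, List.drop_length_add_append]
    rw [h2]
    split_ifs <;> simp
  | cons e rest ih =>
    obtain ⟨i, l⟩ := e
    intro front rst prev hnn
    have hi : 0 ≤ i := hnn (i, l) List.mem_cons_self
    obtain ⟨j, rfl⟩ : ∃ j : Nat, i = (j : Int) := ⟨i.toNat, (Int.toNat_of_nonneg hi).symm⟩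
    simp only [List.map_cons, loopB]
    have h1 : ((prev : Int) + front.length) = ((prev + front.length : Nat) : Int) := by push_cast; ring
    have h2 : ((j : Int) + front.length) = ((j + front.length : Nat) : Int) := by push_cast; ring
    have hchunk : PySem.List.slice (front ++ rst) (some ((prev : Int) + front.length)) (some ((j : Int) + front.length))
        = PySem.List.slice rst (some (prev : Int)) (some (j : Int)) := by
      rw [h1, h2, PySem.List.slice_natCast, PySem.List.slice_natCast]
      rw [Nat.add_comm prev, List.drop_length_add_append]
      congr 1
      omega
    rw [hchunk]
    rw [loopB_cells, loopB_cells rest (j + 1)]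
    have h3 : (j : Int) + (front.length : Int) + 1 = ((j + 1 : Nat) : Int) + (front.length : Int) := by push_cast; ring
    rw [h3, ih front rst (j + 1) (fun q hq => hnn q (List.mem_cons_of_mem _ hq))]
    split_ifs <;> simp

-- the separator table of a separator-free block is empty
theorem seps_nil (xs : List String) (h : ∀ l ∈ xs, PySem.Str.isIn pvSep l = false) (i : Int) :
    (PySem.List.enumerate xs i).filter (fun p => PySem.Str.isIn pvSep p.2) = [] := by
  induction xs generalizing i with
  | nil => simp [PySem.List.enumerate_nil]
  | cons x xs ih =>
    rw [PySem.List.enumerate_cons]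
    have hx : PySem.Str.isIn pvSep x = false := h x (List.mem_cons_self)
    simp only [List.filter_cons, hx]
    exact ih (fun l hl => h l (List.mem_cons_of_mem _ hl)) _

-- the main induction: A = B, by strong induction on the number of lines, peeling the first separator
theorem A_eq_B : ∀ (n : Nat) (lines : List String), lines.length ≤ n →
    split_into_cells_py lines = split_into_cells_py_alt lines := by
  intro n
  induction n with
  | zero =>
    intro lines h
    have : lines = [] := List.eq_nil_of_length_eq_zero (Nat.le_zero.mp h)
    subst this
    simp [split_into_cells_py, split_into_cells_py_alt, PySem.List.enumerate_nil, loopA, loopB,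
      PySem.List.slice]
  | succ n ih =>
    intro lines hlen
    by_cases hall : ∀ l ∈ lines, PySem.Str.isIn pvSep l = false
    · -- no separator at all: one cell (or none)
      rw [split_into_cells_py, split_into_cells_py_alt]
      rw [loopA_pre lines hall, seps_nil lines hall]
      simp only [loopB]
      rw [show PySem.List.slice lines (some (0:Int)) none = lines by
        simp]
      cases lines <;> simp
    · -- lines = pre ++ s :: rest with pre separator-free and s a separator
      set p := fun l => !(PySem.Str.isIn pvSep l) with hp
      have hdw : lines.dropWhile p ≠ [] := by
        intro hnil
        exact hall fun l hl => by simpa [hp] using List.dropWhile_eq_nil_iff.mp hnil l hl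
      obtain ⟨s, rest, hsr⟩ : ∃ s rest, lines.dropWhile p = s :: rest := by
        cases hdd : lines.dropWhile p with
        | nil => exact absurd hdd hdw
        | cons a b => exact ⟨a, b, rfl⟩
      set pre := lines.takeWhile p with hpre
      have hdecomp : lines = pre ++ s :: rest := by
        rw [hpre, ← hsr, List.takeWhile_append_dropWhile]
      have hpresep : ∀ l ∈ pre, PySem.Str.isIn pvSep l = false := by
        intro l hl
        have := List.mem_takeWhile_imp hl
        simpa [hp] using this
      have hssep : PySem.Str.isIn pvSep s = true := by
        have h1 := List.head_dropWhile_not p hdw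
        have h3 : (lines.dropWhile p).head hdw = s := by simp [hsr]
        rw [h3] at h1
        simpa [hp] using h1
      have hrest : rest.length ≤ n := by
        have : lines.length = pre.length + (1 + rest.length) := by
          rw [hdecomp]; simp; omega
        omega
      -- notation
      set k : Int := (pre.length : Int) + 1 with hk
      -- A side
      have hA : split_into_cells_py lines =
          ((if pre ≠ [] then [((0:Int), pre)] else []) ++ [((pre.length : Int), [s])])
            ++ (split_into_cells_py rest).map (fun q => (q.1 + k, q.2)) := by
        rw [split_into_cells_py]
        conv_lhs => rw [hdecomp]
        rw [PySem.List.enumerate_append, loopA_append, loopA_pre pre hpresep]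
        rw [PySem.List.enumerate_cons]
        simp only [loopA, hssep, if_pos]
        have hcs : (if pre = [] then (0:Int) else 0) = 0 := by split_ifs <;> rfl
        rw [hcs]
        rw [loopA_cells]
        have h0 : (0 : Int) + pre.length = (pre.length : Int) := by ring
        rw [h0]
        have e1 : (0 : Int) + k = (pre.length : Int) + 1 := by rw [hk]; ring
        rw [← e1, loopA_shift rest 0 k 0 []]
        rw [split_into_cells_py]
        set st := loopA (PySem.List.enumerate rest 0) ([], 0, []) with hst
        simp only []
        by_cases hcur : st.2.2 = []
        · simp [hcur]
        · simp only [hcur, ne_eq, not_false_iff]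
          split_ifs <;> simp
      -- B side
      have hB : split_into_cells_py_alt lines =
          ((if pre ≠ [] then [((0:Int), pre)] else []) ++ [((pre.length : Int), [s])])
            ++ (split_into_cells_py_alt rest).map (fun q => (q.1 + k, q.2)) := by
        rw [split_into_cells_py_alt]
        conv_lhs => rw [hdecomp]
        rw [PySem.List.enumerate_append, List.filter_append, seps_nil pre hpresep]
        rw [PySem.List.enumerate_cons]
        simp only [List.nil_append, List.filter_cons, hssep, if_pos]
        have hsh : PySem.List.enumerate rest ((0 : Int) + pre.length + 1)
            = (PySem.List.enumerate rest 0).map (fun q => (q.1 + k, q.2)) := by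
          rw [show (0 : Int) + pre.length + 1 = 0 + k by rw [hk]; ring, enumerate_shift]
        rw [hsh, List.filter_map]
        have hfc : ((fun p => PySem.Str.isIn pvSep p.2) ∘ (fun q : Int × String => (q.1 + k, q.2)))
            = (fun p : Int × String => PySem.Str.isIn pvSep p.2) := by
          funext q; rfl
        rw [hfc]
        simp only [loopB]
        have hchunk : PySem.List.slice (pre ++ s :: rest) (some (0:Int)) (some ((0:Int) + pre.length))
            = pre := by
          rw [show (0:Int) + pre.length = ((pre.length : Nat) : Int) by ring]
          rw [show ((0:Int)) = ((0 : Nat) : Int) by rfl, PySem.List.slice_natCast]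
          simp [List.take_left (l₁ := pre) (l₂ := s :: rest)]
        rw [hchunk]
        rw [loopB_cells]
        have hfront : pre ++ s :: rest = (pre ++ [s]) ++ rest := by simp
        have hflen : ((pre ++ [s]).length : Int) = k := by simp [hk]
        have harg : (0 : Int) + (pre.length : Int) + 1 = ((0 : Nat) : Int) + ((pre ++ [s]).length : Int) := by
          simp
        rw [hfront, harg]
        rw [show (fun q : Int × String => (q.1 + k, q.2))
              = (fun q : Int × String => (q.1 + ((pre ++ [s]).length : Int), q.2)) by rw [hflen]]
        rw [loopB_shift ((PySem.List.enumerate rest 0).filter (fun p => PySem.Str.isIn pvSep p.2))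
              (pre ++ [s]) rest 0 ?nn]
        case nn =>
          intro q hq
          have hq' := List.mem_of_mem_filter hq
          rw [PySem.List.mem_enumerate_iff] at hq'
          obtain ⟨m, _, rfl⟩ := hq'
          simp
        rw [split_into_cells_py_alt, hflen]
        split_ifs <;> simp
      rw [hA, hB, ih rest hrest]

-- ===== VERDICT (by name: the statement is the Claim_ definition above) =====
theorem split_into_cells_py_spec : Claim_equal_split_into_cells_py := by
  intro lines _
  unfold Spec_split_into_cells_py
  exact A_eq_B lines.length lines le_rfl
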